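-- pv_equiv track=rewrite | github.com/Maayan-Sarig/ECE-B.Sc. | Intro_To_CS/Lab 3/Task3.py | k_size_rec_subsets
-- ===== SOURCE A (Python) =====
-- def k_size_rec_subsets(n, k, number_str, i):
--     """
--     recursive function that add the wanted strings to the list.
--     :param n:
--     :param k:
--     :param number_str:
--     :param i:
--     :return: list of strings
--     """
--     if k > n or n < 1 or n > 9 or k < 0:
--         raise TypeError("One or more of the inputs are illegal")
--     if k == 0:
--         return [number_str]
--     if i == n+1:
--         return []
--     if i == n:
--         return k_size_rec_subsets(n, k-1, number_str + str(i), i + 1)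
--     if i <= n:
--         return k_size_rec_subsets(n, k, number_str, i + 1) + k_size_rec_subsets(n, k-1, number_str + str(i), i+1)
-- ===== SOURCE B (Python) =====
-- def k_size_rec_subsets(n, k, number_str, i):
--     """
--     Same result as A, but iterative-over-first-digit instead of include/exclude
--     branching: enumerate k-size combinations of digits i..n directly, choosing
--     the smallest digit of the combination in descending order (which is exactly
--     the order the include/exclude recursion emits), then prefix number_str.
--     """
--     if k > n or n < 1 or n > 9 or k < 0:
--         raise TypeError("One or more of the inputs are illegal")
--
--     def combos(start, size):
--         # all size-element combinations of start..n as digit strings,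
--         # ordered by descending smallest element (recursively)
--         if size == 0:
--             return ['']
--         res = []
--         for first in range(n, start - 1, -1):
--             for tail in combos(first + 1, size - 1):
--                 res.append(str(first) + tail)
--         return res
--
--     return [number_str + suffix for suffix in combos(i, k)]
-- ===== Notes on version B (the rewrite author's own statement) =====
-- stated objective: alternative
-- what changed: Replaces the binary include/exclude recursion with a smallest-digit-first combination enumerator: an inner helper loops over candidate first digits in descending order and prefixes each onto recursively built tails, naturally producing A's emission order without re-running input validation at every recursive step.
-- outside the precondition, e.g. on k_size_rec_subsets(3, 2, '', 5): A returns None, B returns []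
import Mathlib
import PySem

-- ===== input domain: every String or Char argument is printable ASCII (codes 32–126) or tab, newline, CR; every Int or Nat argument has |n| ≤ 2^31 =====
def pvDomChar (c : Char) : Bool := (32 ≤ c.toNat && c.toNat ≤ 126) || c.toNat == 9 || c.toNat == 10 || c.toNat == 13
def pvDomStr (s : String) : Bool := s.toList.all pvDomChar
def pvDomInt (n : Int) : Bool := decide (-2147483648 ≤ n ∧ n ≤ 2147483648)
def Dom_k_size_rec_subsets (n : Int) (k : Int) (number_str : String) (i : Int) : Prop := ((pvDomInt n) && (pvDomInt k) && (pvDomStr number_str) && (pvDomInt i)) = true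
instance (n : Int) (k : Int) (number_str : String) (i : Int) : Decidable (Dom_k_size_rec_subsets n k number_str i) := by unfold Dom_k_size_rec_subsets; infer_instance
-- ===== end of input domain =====

-- B replaces the include/exclude recursion with a smallest-digit-first combination
-- enumerator over a descending range (objective: alternative; same output order).

-- ===== PORT A =====
-- literal transliteration of A; the two [] branches marked below are where the
-- Python raises TypeError resp. falls off returning None — both outside Pre_.
def k_size_rec_subsets (n : Int) (k : Int) (number_str : String) (i : Int) : List String :=
  if k > n ∨ n < 1 ∨ n > 9 ∨ k < 0 then []        -- Python: raise TypeError (excluded by Pre_)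
  else if k = 0 then [number_str]
  else if i = n + 1 then []
  else if i = n then k_size_rec_subsets n (k - 1) (number_str ++ PySem.Int.toStr i) (i + 1)
  else if i ≤ n then
    k_size_rec_subsets n k number_str (i + 1) ++
      k_size_rec_subsets n (k - 1) (number_str ++ PySem.Int.toStr i) (i + 1)
  else []                                          -- Python: falls through, returns None (excluded by Pre_)
termination_by (n + 1 - i).toNat
decreasing_by all_goals omega

-- ===== PORT B =====
-- combos(start, size) of Source B; size is a Nat (Source B only calls it with size ≥ 0,
-- guaranteed by the validation guard), recursion is structural on size.
def pvAltCombos (n : Int) (start : Int) : Nat → List String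
  | 0 => [""]
  | size + 1 =>
    (PySem.List.pyRange n (start - 1) (-1)).foldl
      (fun res first =>
        (pvAltCombos n (first + 1) size).foldl
          (fun res tail => res ++ [PySem.Int.toStr first ++ tail]) res) []

def k_size_rec_subsets_alt (n : Int) (k : Int) (number_str : String) (i : Int) : List String :=
  if k > n ∨ n < 1 ∨ n > 9 ∨ k < 0 then []         -- Python: raise TypeError (excluded by Pre_)
  else (pvAltCombos n i k.toNat).map (fun suffix => number_str ++ suffix)

-- ===== PRECONDITION & SPEC =====
-- Pre_ excludes (a) the validation inputs on which A raises TypeError, and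
-- (b) inputs with k > 0 and i > n+1, where A falls off the if-chain and returns
-- None instead of a list.
def Pre_k_size_rec_subsets (n : Int) (k : Int) (number_str : String) (i : Int) : Prop :=
  ¬ (k > n ∨ n < 1 ∨ n > 9 ∨ k < 0) ∧ (k = 0 ∨ i ≤ n + 1)
instance (n : Int) (k : Int) (number_str : String) (i : Int) : Decidable (Pre_k_size_rec_subsets n k number_str i) := by unfold Pre_k_size_rec_subsets; infer_instance

def pvWitness_k_size_rec_subsets : Int × Int × String × Int := (3, 2, "", 1)

def Spec_k_size_rec_subsets (n : Int) (k : Int) (number_str : String) (i : Int) (out : List String) : Prop := out = k_size_rec_subsets_alt n k number_str i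
instance (n : Int) (k : Int) (number_str : String) (i : Int) (out : List String) : Decidable (Spec_k_size_rec_subsets n k number_str i out) := by unfold Spec_k_size_rec_subsets; infer_instance

-- ===== CLAIM (what is proved, stated in full; the proofs are below) =====
def Claim_equal_k_size_rec_subsets : Prop := ∀ (n : Int) (k : Int) (number_str : String) (i : Int), Dom_k_size_rec_subsets n k number_str i → Pre_k_size_rec_subsets n k number_str i → Spec_k_size_rec_subsets n k number_str i (k_size_rec_subsets n k number_str i)

-- ===== LEMMAS AND PROOFS =====

-- empty range: no combination of size ≥ 1 from an empty digit range
theorem pvAltCombos_nil (n start : Int) (size : Nat) (h : n < start) :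
    pvAltCombos n start (size + 1) = [] := by
  simp [pvAltCombos, PySem.List.pyRange_neg_one_eq_nil (by omega : n ≤ start - 1)]

-- peel the smallest digit: fold over [n,…,i] = fold over [n,…,i+1] then step at i
theorem pvAltCombos_step (n i : Int) (size : Nat) (h : i ≤ n) :
    pvAltCombos n i (size + 1) =
      pvAltCombos n (i + 1) (size + 1) ++
        (pvAltCombos n (i + 1) size).map (fun tail => PySem.Int.toStr i ++ tail) := by
  have hsplit : PySem.List.pyRange n (i - 1) (-1) = PySem.List.pyRange n i (-1) ++ [i] := by
    rw [PySem.List.pyRange_neg_one_eq_reverse n (i - 1),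
        PySem.List.pyRange_neg_one_eq_reverse n i]
    have h1 : (i - 1) + 1 = i := by ring
    rw [h1, PySem.List.pyRange_one_cons (by omega : i < n + 1)]
    simp
  conv_rhs => rw [pvAltCombos]
  have h2 : i + 1 - 1 = i := by ring
  rw [h2]
  rw [pvAltCombos, hsplit, List.foldl_append, List.foldl_cons, List.foldl_nil,
      PySem.List.foldl_append_singleton_eq_map]

-- main invariant: A's include/exclude recursion equals number_str prefixed onto
-- B's smallest-first combination list
theorem pv_main (n : Int) (hn1 : 1 ≤ n) (hn9 : n ≤ 9) :
    ∀ (j : Nat) (k i : Int) (s : String), (n + 1 - i).toNat = j →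
      0 ≤ k → k ≤ n → (k = 0 ∨ i ≤ n + 1) →
      k_size_rec_subsets n k s i = (pvAltCombos n i k.toNat).map (fun t => s ++ t) := by
  intro j
  induction j using Nat.strong_induction_on with
  | _ j ih =>
    intro k i s hj hk0 hkn hki
    by_cases hk : k = 0
    · subst hk
      rw [k_size_rec_subsets, if_neg (by omega), if_pos rfl]
      simp [pvAltCombos]
    · have hi : i ≤ n + 1 := hki.resolve_left hk
      obtain ⟨sz, hsz⟩ : ∃ sz, k.toNat = sz + 1 := ⟨k.toNat - 1, by omega⟩
      by_cases hitop : i = n + 1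
      · rw [k_size_rec_subsets, if_neg (by omega), if_neg hk, if_pos hitop]
        rw [hsz, hitop, pvAltCombos_nil n (n + 1) sz (by omega)]
        simp
      · have hile : i ≤ n := by omega
        have hstep := pvAltCombos_step n i sz hile
        have hk1 : (k - 1).toNat = sz := by omega
        have ih1 := ih (n + 1 - (i + 1)).toNat (by omega) (k - 1)
            (i + 1) (s ++ PySem.Int.toStr i) rfl (by omega) (by omega) (by omega)
        rw [hk1] at ih1
        by_cases hin : i = n
        · rw [k_size_rec_subsets, if_neg (by omega), if_neg hk, if_neg hitop, if_pos hin]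
          rw [hsz, hstep, pvAltCombos_nil n (i + 1) sz (by omega), ih1]
          simp [List.map_map, Function.comp_def, String.append_assoc]
        · have ih2 := ih (n + 1 - (i + 1)).toNat (by omega) k (i + 1) s rfl
            (by omega) (by omega) (by omega)
          rw [k_size_rec_subsets, if_neg (by omega), if_neg hk, if_neg hitop, if_neg hin,
              if_pos hile]
          rw [hsz, hstep, ← hsz, ih1, ih2, hsz]
          simp [List.map_map, Function.comp_def, String.append_assoc]

-- ===== VERDICT (by name: the statement is the Claim_ definition above) =====
theorem k_size_rec_subsets_spec : Claim_equal_k_size_rec_subsets := by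
  intro n k number_str i _ hpre
  obtain ⟨hok, hki⟩ := hpre
  unfold Spec_k_size_rec_subsets k_size_rec_subsets_alt
  rw [if_neg hok]
  exact pv_main n (by omega) (by omega) _ k i number_str rfl (by omega) (by omega) hki
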